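-- pv_equiv track=rewrite | github.com/birocoles/gravmag | gravmag/plot_functions.py | fields_list
-- ===== SOURCE A (Python) =====
-- def fields_list(computed, true, diffs):
--     assert len(computed) == len(true) == len(diffs)
--     fields = []
--     for c, t, d in zip(computed, true, diffs):
--         fields.append(c)
--         fields.append(t)
--         fields.append(d)
--     return fields
-- ===== SOURCE B (Python) =====
-- def fields_list(computed, true, diffs):
--     assert len(computed) == len(true) == len(diffs)
--     fields = [None] * (3 * len(computed))
--     fields[0::3] = computed
--     fields[1::3] = true
--     fields[2::3] = diffs
--     return fields
-- ===== Notes on version B (the rewrite author's own statement) =====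
-- stated objective: alternative
-- what changed: Replaces the element-by-element interleaving loop with a preallocated output filled by three strided slice assignments (fields[0::3]=computed, etc.).
import Mathlib
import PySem

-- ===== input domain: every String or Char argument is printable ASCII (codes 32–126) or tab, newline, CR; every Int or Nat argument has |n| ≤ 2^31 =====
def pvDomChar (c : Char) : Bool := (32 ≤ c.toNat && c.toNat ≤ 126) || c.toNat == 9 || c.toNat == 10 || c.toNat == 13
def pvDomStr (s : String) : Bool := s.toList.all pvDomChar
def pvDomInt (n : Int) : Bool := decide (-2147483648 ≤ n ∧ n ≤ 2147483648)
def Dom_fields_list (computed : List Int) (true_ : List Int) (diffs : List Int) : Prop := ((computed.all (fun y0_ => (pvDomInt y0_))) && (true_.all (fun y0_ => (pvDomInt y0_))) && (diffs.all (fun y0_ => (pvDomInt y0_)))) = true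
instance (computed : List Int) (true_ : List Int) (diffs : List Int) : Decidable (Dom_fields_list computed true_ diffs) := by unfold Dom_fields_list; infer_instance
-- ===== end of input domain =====

-- B replaces A's element-by-element interleaving loop with a preallocated output
-- filled by three strided slice assignments; same cost, different decomposition.

-- ===== PORT A =====
-- the for-loop over zip(computed, true, diffs), appending c, t, d in turn
def fields_list (computed : List Int) (true_ : List Int) (diffs : List Int) : List Int :=
  ((computed.zip true_).zip diffs).foldl
    (fun fields p => fields ++ [p.1.1, p.1.2, p.2]) []

-- ===== PORT B =====
-- fields[start::3] = xs : write each element of xs at the strided positions start, start+3, …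
def setStride : List Int → Nat → Nat → List Int → List Int
  | fs, _, _, [] => fs
  | fs, s, k, x :: xs => setStride (fs.set s x) (s + k) k xs

-- placeholder 0 plays the role of Python's None (every slot is overwritten)
def fields_list_alt (computed : List Int) (true_ : List Int) (diffs : List Int) : List Int :=
  let fields := List.replicate (3 * computed.length) 0
  setStride (setStride (setStride fields 0 3 computed) 1 3 true_) 2 3 diffs

-- ===== PRECONDITION & SPEC =====
-- Pre_ excludes length mismatches, on which A's assert raises AssertionError
def Pre_fields_list (computed : List Int) (true_ : List Int) (diffs : List Int) : Prop :=
  computed.length = true_.length ∧ true_.length = diffs.length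
instance (computed : List Int) (true_ : List Int) (diffs : List Int) : Decidable (Pre_fields_list computed true_ diffs) := by unfold Pre_fields_list; infer_instance
def pvWitness_fields_list : List Int × List Int × List Int := ([1, 2], [3, 4], [5, 6])

def Spec_fields_list (computed : List Int) (true_ : List Int) (diffs : List Int) (out : List Int) : Prop := out = fields_list_alt computed true_ diffs
instance (computed : List Int) (true_ : List Int) (diffs : List Int) (out : List Int) : Decidable (Spec_fields_list computed true_ diffs out) := by unfold Spec_fields_list; infer_instance

-- ===== CLAIM (what is proved, stated in full; the proofs are below) =====
def Claim_equal_fields_list : Prop := ∀ (computed : List Int) (true_ : List Int) (diffs : List Int), Dom_fields_list computed true_ diffs → Pre_fields_list computed true_ diffs → Spec_fields_list computed true_ diffs (fields_list computed true_ diffs)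

-- ===== LEMMAS AND PROOFS =====

theorem setStride_cons (a : Int) (fs : List Int) (s k : Nat) (xs : List Int) :
    setStride (a :: fs) (s + 1) k xs = a :: setStride fs s k xs := by
  induction xs generalizing fs s with
  | nil => simp [setStride]
  | cons x xs ih =>
    simp only [setStride, List.set_cons_succ]
    rw [show s + 1 + k = s + k + 1 by omega, ih]

theorem foldl_acc (l : List ((Int × Int) × Int)) (acc : List Int) :
    l.foldl (fun fields p => fields ++ [p.1.1, p.1.2, p.2]) acc
      = acc ++ l.foldl (fun fields p => fields ++ [p.1.1, p.1.2, p.2]) [] := by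
  induction l generalizing acc with
  | nil => simp
  | cons p l ih =>
    simp only [List.foldl_cons]
    rw [ih, ih (([] : List Int) ++ [p.1.1, p.1.2, p.2])]
    simp

theorem alt_cons (c t d : Int) (cs ts ds : List Int) :
    fields_list_alt (c :: cs) (t :: ts) (d :: ds)
      = c :: t :: d :: fields_list_alt cs ts ds := by
  simp only [fields_list_alt, List.length_cons]
  rw [show 3 * (cs.length + 1) = (3 * cs.length) + 1 + 1 + 1 by ring]
  simp only [List.replicate_succ, setStride, List.set_cons_zero]
  rw [show (0:Nat) + 3 = 0 + 1 + 1 + 1 by rfl, show (1:Nat) + 3 = 1 + 1 + 1 + 1 by rfl,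
      show (2:Nat) + 3 = 2 + 1 + 1 + 1 by rfl]
  rw [setStride_cons, setStride_cons, setStride_cons]
  simp only [List.set_cons_zero, List.set_cons_succ]
  rw [show (0:Nat) + 3 = 0 + 1 + 1 + 1 by rfl, show (1:Nat) + 3 = 1 + 1 + 1 + 1 by rfl]
  rw [setStride_cons, setStride_cons, setStride_cons]
  simp only [List.set_cons_zero, List.set_cons_succ]
  rw [show (0:Nat) + 3 = 0 + 1 + 1 + 1 by rfl, setStride_cons, setStride_cons, setStride_cons]

theorem main_eq (computed true_ diffs : List Int)
    (h1 : computed.length = true_.length) (h2 : true_.length = diffs.length) :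
    fields_list computed true_ diffs = fields_list_alt computed true_ diffs := by
  induction computed generalizing true_ diffs with
  | nil =>
    cases true_ with
    | nil =>
      cases diffs with
      | nil => rfl
      | cons d ds => simp at h2
    | cons t ts => simp at h1
  | cons c cs ih =>
    cases true_ with
    | nil => simp at h1
    | cons t ts =>
      cases diffs with
      | nil => simp at h2
      | cons d ds =>
        rw [alt_cons, ← ih ts ds (by simpa using h1) (by simpa using h2)]
        simp only [fields_list, List.zip_cons_cons, List.foldl_cons, List.nil_append]
        rw [foldl_acc]
        rfl

-- ===== VERDICT (by name: the statement is the Claim_ definition above) =====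
theorem fields_list_spec : Claim_equal_fields_list := by
  intro computed true_ diffs _ hpre
  exact main_eq computed true_ diffs hpre.1 hpre.2
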